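-- pv_equiv track=rewrite | github.com/barbara-su/MaxKCutParallel | src/graph_generators/utils.py | get_row_mapping
-- ===== SOURCE A (Python) =====
-- def get_row_mapping(n, K):
--     """
--     Create mapping from V_tilde indices to original V indices.
--
--     Parameters
--     ----------
--     n : int
--         Number of rows in V
--     K : int
--         Number of partitions
--
--     Returns
--     -------
--     mapping : dict
--         Dictionary mapping V_tilde indices to (V_row, rotation) pairs
--     inverse_mapping : dict
--         Dictionary mapping V_row to list of V_tilde indices
--     """
--     mapping = {}
--     inverse_mapping = {}
--
--     for i in range(n):
--         inverse_mapping[i] = []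
--         for j in range(K):
--             v_tilde_idx = i*K + j
--             mapping[v_tilde_idx] = (i, j)
--             inverse_mapping[i].append(v_tilde_idx)
--
--     return mapping, inverse_mapping
-- ===== SOURCE B (Python) =====
-- def get_row_mapping(n, K):
--     """
--     Create mapping from V_tilde indices to original V indices.
--
--     One flat loop over all n*K V_tilde indices recovers the (row, rotation)
--     coordinates by divmod arithmetic and collects each row's indices in a
--     list-of-lists buffer; inverse_mapping is then materialised at the end
--     from that buffer via dict(enumerate(...)).
--     """
--     rows = [[] for _ in range(n)]
--     mapping = {}
--     for idx in range(len(rows) * K):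
--         i, j = divmod(idx, K)
--         mapping[idx] = (i, j)
--         rows[i].append(idx)
--     inverse_mapping = dict(enumerate(rows))
--     return mapping, inverse_mapping
-- ===== Notes on version B (the rewrite author's own statement) =====
-- stated objective: alternative
-- what changed: Replaces A's nested loops that fill both dicts incrementally by one flat loop over range(n*K) that recovers (row, rotation) by divmod and accumulates rows in a list-of-lists buffer; inverse_mapping is materialised afterwards from that buffer with dict(enumerate(...)).
import Mathlib
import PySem

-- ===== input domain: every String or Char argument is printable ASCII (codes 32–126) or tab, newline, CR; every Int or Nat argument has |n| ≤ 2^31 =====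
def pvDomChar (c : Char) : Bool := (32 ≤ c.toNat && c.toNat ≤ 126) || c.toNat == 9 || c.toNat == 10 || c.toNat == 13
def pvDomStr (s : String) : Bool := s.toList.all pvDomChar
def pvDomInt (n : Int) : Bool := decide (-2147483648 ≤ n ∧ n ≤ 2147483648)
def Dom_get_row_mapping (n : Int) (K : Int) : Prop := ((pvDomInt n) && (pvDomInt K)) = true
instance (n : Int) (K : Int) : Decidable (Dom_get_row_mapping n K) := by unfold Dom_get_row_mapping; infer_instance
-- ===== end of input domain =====

-- B replaces A's nested loops (which fill both dicts incrementally) by one flat loop over all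
-- n*K indices that recovers (row, rotation) by divmod and buffers each row in a list of lists,
-- materialising inverse_mapping afterwards with dict(enumerate(...)) (alternative decomposition,
-- same cost).

-- ===== PORT A =====
def get_row_mapping (n : Int) (K : Int) : (List (Int × Int × Int)) × (List (Int × List Int)) :=
  let st :=
    (PySem.List.pyRange 0 n).foldl
      (fun (st : PySem.Dict Int (Int × Int) × PySem.Dict Int (List Int)) i =>
        let st : PySem.Dict Int (Int × Int) × PySem.Dict Int (List Int) :=
          (st.1, st.2.insert i [])                     -- inverse_mapping[i] = []
        (PySem.List.pyRange 0 K).foldl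
          (fun st j =>
            let v_tilde_idx := i * K + j
            (st.1.insert v_tilde_idx (i, j),           -- mapping[v_tilde_idx] = (i, j)
             st.2.modify i [] (fun l => l ++ [v_tilde_idx])))  -- inverse_mapping[i].append(...)
          st)
      (PySem.Dict.empty, PySem.Dict.empty)
  (st.1.items, st.2.items)

-- ===== PORT B =====
-- divmod(idx, K) is only evaluated inside the loop, where the range is nonempty, which forces
-- K > 0: there the total floordiv/mod are Python-exact.  rows[i].append(idx) is ported through
-- PySem.List.pyGet? then List.set; the index i = idx // K is always in range when the loop runs,
-- so the (unreachable) none branch leaves rows unchanged.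
-- rows[i].append(idx) with i = idx // K (in range whenever the loop body runs)
def pvH (K : Int) (rows : List (List Int)) (idx : Int) : List (List Int) :=
  match PySem.List.pyGet? rows (PySem.Int.floordiv idx K) with
  | some l => rows.set (PySem.Int.floordiv idx K).toNat (l ++ [idx])
  | none => rows

def get_row_mapping_alt (n : Int) (K : Int) : (List (Int × Int × Int)) × (List (Int × List Int)) :=
  let rows0 : List (List Int) := (PySem.List.pyRange 0 n).map (fun _ => ([] : List Int))
  let st :=
    (PySem.List.pyRange 0 ((rows0.length : Int) * K)).foldl
      (fun (st : PySem.Dict Int (Int × Int) × List (List Int)) idx =>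
        (st.1.insert idx (PySem.Int.floordiv idx K, PySem.Int.mod idx K),
         pvH K st.2 idx))
      (PySem.Dict.empty, rows0)
  let inverse :=
    (PySem.List.enumerate st.2).foldl
      (fun (d : PySem.Dict Int (List Int)) p => d.insert p.1 p.2) PySem.Dict.empty
  (st.1.items, inverse.items)

-- ===== PRECONDITION & SPEC =====
def Spec_get_row_mapping (n : Int) (K : Int) (out : (List (Int × Int × Int)) × (List (Int × List Int))) : Prop := out = get_row_mapping_alt n K
instance (n : Int) (K : Int) (out : (List (Int × Int × Int)) × (List (Int × List Int))) : Decidable (Spec_get_row_mapping n K out) := by unfold Spec_get_row_mapping; infer_instance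

-- ===== CLAIM (what is proved, stated in full; the proofs are below) =====
def Claim_equal_get_row_mapping : Prop := ∀ (n : Int) (K : Int), Dom_get_row_mapping n K → Spec_get_row_mapping n K (get_row_mapping n K)

-- ===== LEMMAS AND PROOFS =====

-- A's per-row inner loop, mapping component
def pvF (K : Int) (m : PySem.Dict Int (Int × Int)) (i : Int) : PySem.Dict Int (Int × Int) :=
  (PySem.List.pyRange 0 K).foldl (fun m j => m.insert (i * K + j) (i, j)) m

-- A's per-row step, inverse_mapping component
def pvG (K : Int) (d : PySem.Dict Int (List Int)) (i : Int) : PySem.Dict Int (List Int) :=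
  (PySem.List.pyRange 0 K).foldl (fun d j => d.modify i [] (fun l => l ++ [i * K + j]))
    (d.insert i [])

-- the row block A inserts into mapping for row i
def pvRow (K i : Int) : List (Int × Int × Int) :=
  (PySem.List.pyRange 0 K).map (fun j => (i * K + j, i, j))

-- row i's block of V_tilde indices
def pvBlock (K : Int) (k : Nat) : List Int :=
  PySem.List.pyRange ((k : Int) * K) ((k : Int) * K + K)

theorem pvA_split (n K : Int) :
    get_row_mapping n K =
      (((PySem.List.pyRange 0 n).foldl (pvF K) PySem.Dict.empty).items,
       ((PySem.List.pyRange 0 n).foldl (pvG K) PySem.Dict.empty).items) := by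
  unfold get_row_mapping
  have hstep :
      (fun (st : PySem.Dict Int (Int × Int) × PySem.Dict Int (List Int)) i =>
        (PySem.List.pyRange 0 K).foldl
          (fun st j => (st.1.insert (i * K + j) (i, j),
                        st.2.modify i [] (fun l => l ++ [i * K + j])))
          (st.1, st.2.insert i [])) =
      (fun (st : PySem.Dict Int (Int × Int) × PySem.Dict Int (List Int)) i =>
        (pvF K st.1 i, pvG K st.2 i)) := by
    funext st i
    unfold pvF pvG
    exact PySem.List.foldl_prod_mk
      (fun m j => m.insert (i * K + j) (i, j))
      (fun d j => d.modify i [] (fun l => l ++ [i * K + j]))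
      (PySem.List.pyRange 0 K) st.1 (st.2.insert i [])
  simp only []
  rw [hstep, PySem.List.foldl_prod_mk]

theorem pvB_split (n K : Int) :
    get_row_mapping_alt n K =
      ((((PySem.List.pyRange 0 ((((PySem.List.pyRange 0 n).map (fun _ => ([] : List Int))).length : Int) * K)).foldl
          (fun (m : PySem.Dict Int (Int × Int)) idx =>
            m.insert idx (PySem.Int.floordiv idx K, PySem.Int.mod idx K))
          PySem.Dict.empty).items),
       ((PySem.List.enumerate
          ((PySem.List.pyRange 0 ((((PySem.List.pyRange 0 n).map (fun _ => ([] : List Int))).length : Int) * K)).foldl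
            (pvH K) ((PySem.List.pyRange 0 n).map (fun _ => ([] : List Int))))).foldl
          (fun (d : PySem.Dict Int (List Int)) p => d.insert p.1 p.2) PySem.Dict.empty).items) := by
  unfold get_row_mapping_alt
  simp only []
  rw [PySem.List.foldl_prod_mk
    (f := fun (m : PySem.Dict Int (Int × Int)) idx =>
      m.insert idx (PySem.Int.floordiv idx K, PySem.Int.mod idx K))
    (g := fun rows idx => pvH K rows idx)]

theorem pv_contains_false {ν : Type} (d : PySem.Dict Int ν) (k : Int)
    (h : ∀ p ∈ d.items, p.1 ≠ k) : d.contains k = false := by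
  cases hc : d.contains k with
  | false => rfl
  | true =>
    exfalso
    rw [PySem.Dict.contains_iff_mem_keys] at hc
    simp only [PySem.Dict.keys, List.mem_map] at hc
    obtain ⟨p, hp, hpk⟩ := hc
    exact h p hp hpk

theorem pv_insert_insert {ν : Type} (d : PySem.Dict Int ν) (k : Int) (v w : ν)
    (h : d.contains k = false) : (d.insert k v).insert k w = d.insert k w := by
  apply PySem.Dict.ext
  have h1 := PySem.Dict.items_insert_of_not_contains d v h
  have h2 := PySem.Dict.items_insert_of_not_contains d w h
  have hc : (d.insert k v).contains k = true := PySem.Dict.contains_insert_self d k v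
  rw [PySem.Dict.items_insert_of_contains _ w hc, h1, h2]
  have hk : ∀ p ∈ d.items, p.1 ≠ k := by
    intro p hp hpk
    have : d.contains k = true := by
      rw [PySem.Dict.contains_iff_mem_keys]
      simp only [PySem.Dict.keys, List.mem_map]
      exact ⟨p, hp, hpk⟩
    simp [this] at h
  rw [List.map_append]
  congr 1
  · have : List.map (fun p => if (p.1 == k) = true then (k, w) else p) d.items =
        List.map id d.items := by
      apply List.map_congr_left
      intro p hp
      simp [hk p hp]
    rw [this, List.map_id]
  · simp

theorem pv_inner_inv (js : List Int) (d : PySem.Dict Int (List Int)) (i : Int)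
    (acc : List Int) (h : d.contains i = false) :
    js.foldl (fun d idx => d.modify i [] (fun l => l ++ [idx])) (d.insert i acc) =
      d.insert i (acc ++ js) := by
  induction js generalizing acc with
  | nil => simp
  | cons idx js ih =>
    simp only [List.foldl_cons]
    have : (d.insert i acc).modify i [] (fun l => l ++ [idx]) = d.insert i (acc ++ [idx]) := by
      unfold PySem.Dict.modify
      rw [PySem.Dict.getD_insert_self, pv_insert_insert d i acc _ h]
    rw [this, ih (acc ++ [idx])]
    simp

theorem pv_pyRange_shift (a K : Int) :
    (PySem.List.pyRange 0 K).map (fun j => a + j) = PySem.List.pyRange a (a + K) := by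
  rw [PySem.List.pyRange_one, PySem.List.pyRange_one, List.map_map]
  have : a + K - a = K - 0 := by ring
  rw [this]
  apply List.map_congr_left
  intro k _
  simp

theorem pv_pyRange0 (n : Int) :
    PySem.List.pyRange 0 n = (List.range n.toNat).map (Nat.cast : Nat → Int) := by
  rw [PySem.List.pyRange_one]
  have : n - 0 = n := by ring
  rw [this]
  apply List.map_congr_left
  intro k _
  simp

-- characterisation of A's inverse_mapping fold (any K)
theorem pv_invM (K : Int) (t : Nat) :
    (((List.range t).map (Nat.cast : Nat → Int)).foldl (pvG K) PySem.Dict.empty).items =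
      (List.range t).map (fun (k : Nat) => ((k : Int), pvBlock K k)) := by
  induction t with
  | zero => rfl
  | succ t ih =>
    rw [List.range_succ, List.map_append, List.foldl_append, List.map_append]
    simp only [List.map_cons, List.map_nil, List.foldl_cons, List.foldl_nil]
    set d := ((List.range t).map (Nat.cast : Nat → Int)).foldl (pvG K) PySem.Dict.empty with hd
    have hc : d.contains (t : Int) = false := by
      apply pv_contains_false
      intro p hp hpk
      rw [ih] at hp
      obtain ⟨k, hk, hpe⟩ := List.mem_map.mp hp
      have : ((k : Int)) = (t : Int) := by rw [← hpe] at hpk; exact hpk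
      have hkt : k = t := by exact_mod_cast this
      rw [List.mem_range] at hk
      omega
    have hG : pvG K d (t : Int) = d.insert (t : Int) (pvBlock K t) := by
      unfold pvG pvBlock
      have hfm : (PySem.List.pyRange 0 K).foldl
          (fun d j => d.modify (t : Int) [] (fun l => l ++ [(t : Int) * K + j]))
          (d.insert (t : Int) []) =
          ((PySem.List.pyRange 0 K).map (fun j => (t : Int) * K + j)).foldl
          (fun d idx => d.modify (t : Int) [] (fun l => l ++ [idx]))
          (d.insert (t : Int) []) := by
        rw [List.foldl_map]
      rw [hfm, pv_inner_inv _ d _ [] hc, List.nil_append, pv_pyRange_shift]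
    rw [hG, PySem.Dict.items_insert_of_not_contains _ _ hc, ih]

-- keys already in A's mapping after t rows are below t*K (K > 0)
theorem pv_key_lt (K : Int) (hK : 0 < K) (t : Nat) (p : Int × Int × Int)
    (hp : p ∈ ((List.range t).map (Nat.cast : Nat → Int)).flatMap (pvRow K)) :
    p.1 < (t : Int) * K := by
  rw [List.mem_flatMap] at hp
  obtain ⟨i, hi, hpi⟩ := hp
  obtain ⟨k, hk, rfl⟩ := List.mem_map.mp hi
  unfold pvRow at hpi
  obtain ⟨j, hj, rfl⟩ := List.mem_map.mp hpi
  rw [PySem.List.mem_pyRange_one] at hj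
  rw [List.mem_range] at hk
  have h1 : (k : Int) + 1 ≤ (t : Int) := by exact_mod_cast hk
  have h2 : ((k : Int) + 1) * K ≤ (t : Int) * K := by
    exact mul_le_mul_of_nonneg_right h1 (le_of_lt hK)
  have : (k : Int) * K + j < ((k : Int) + 1) * K := by nlinarith [hj.1, hj.2]
  simp only []
  linarith

-- characterisation of A's mapping fold for K > 0
theorem pv_mapM (K : Int) (hK : 0 < K) (t : Nat) :
    (((List.range t).map (Nat.cast : Nat → Int)).foldl (pvF K) PySem.Dict.empty).items =
      ((List.range t).map (Nat.cast : Nat → Int)).flatMap (pvRow K) := by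
  induction t with
  | zero => rfl
  | succ t ih =>
    rw [List.range_succ, List.map_append, List.foldl_append, List.flatMap_append]
    simp only [List.map_cons, List.map_nil, List.foldl_cons, List.foldl_nil,
      List.flatMap_cons, List.flatMap_nil, List.append_nil]
    set d := ((List.range t).map (Nat.cast : Nat → Int)).foldl (pvF K) PySem.Dict.empty with hd
    unfold pvF
    rw [PySem.Dict.items_foldl_insert_fresh (PySem.List.pyRange 0 K)
      (fun j => (t : Int) * K + j) (fun j => ((t : Int), j)) d ?fresh ?nodup, ih]
    · rfl
    case fresh =>
      intro j hj
      apply pv_contains_false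
      intro p hp hpk
      rw [ih] at hp
      have hlt := pv_key_lt K hK t p hp
      rw [PySem.List.mem_pyRange_one] at hj
      rw [hpk] at hlt
      linarith [hj.1]
    case nodup =>
      apply List.Nodup.map _ (PySem.List.nodup_pyRange_one 0 K)
      intro a b hab
      exact add_left_cancel hab

-- K ≤ 0: the mapping fold never inserts anything
theorem pv_mapM_nonpos (K : Int) (hK : K ≤ 0) (l : List Int) :
    (l.foldl (pvF K) PySem.Dict.empty) = PySem.Dict.empty := by
  have hF : ∀ m i, pvF K m i = m := by
    intro m i
    unfold pvF
    rw [PySem.List.pyRange_one_eq_nil hK]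
    rfl
  induction l with
  | nil => rfl
  | cons a l ih => rw [List.foldl_cons, hF]; exact ih

-- the per-row blocks of A and B coincide (K > 0)
theorem pv_row_eq (K i : Int) (hK : 0 < K) :
    pvRow K i =
      (PySem.List.pyRange (i * K) (i * K + K)).map
        (fun idx => (idx, PySem.Int.floordiv idx K, PySem.Int.mod idx K)) := by
  rw [← pv_pyRange_shift (i * K) K, List.map_map]
  unfold pvRow
  apply List.map_congr_left
  intro j hj
  rw [PySem.List.mem_pyRange_one] at hj
  have hfd : PySem.Int.floordiv (i * K + j) K = i := by
    rw [PySem.Int.floordiv_eq_iff_of_pos hK]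
    constructor
    · nlinarith [hj.1]
    · nlinarith [hj.2]
  have hmd : PySem.Int.mod (i * K + j) K = j := by
    have := PySem.Int.floordiv_mul_add_mod (i * K + j) K
    rw [hfd] at this
    linarith
  simp [hfd, hmd]

-- B's empty row buffer is a map over List.range
theorem pv_rows0 (n : Int) :
    (PySem.List.pyRange 0 n).map (fun _ => ([] : List Int)) =
      (List.range n.toNat).map (fun _ => ([] : List Int)) := by
  rw [pv_pyRange0, List.map_map]
  rfl

-- the blocks tile the whole flat range (K > 0)
theorem pv_blocks_flatten (K : Int) (hK : 0 < K) (t : Nat) :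
    (List.range t).flatMap (pvBlock K) = PySem.List.pyRange 0 ((t : Int) * K) := by
  induction t with
  | zero => simp [PySem.List.pyRange_one_eq_nil (le_refl 0)]
  | succ t ih =>
    rw [List.range_succ, List.flatMap_append, ih]
    have hsplit : PySem.List.pyRange 0 (((t + 1 : Nat) : Int) * K) =
        PySem.List.pyRange 0 ((t : Int) * K) ++
        PySem.List.pyRange ((t : Int) * K) ((t : Int) * K + K) := by
      have h1 : (0 : Int) ≤ (t : Int) * K := by positivity
      have h2 : (t : Int) * K ≤ (t : Int) * K + K := by linarith
      have h3 : ((t + 1 : Nat) : Int) * K = (t : Int) * K + K := by push_cast; ring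
      rw [h3]
      exact PySem.List.pyRange_one_append 0 ((t : Int) * K) ((t : Int) * K + K) h1 h2
    rw [hsplit]
    simp [pvBlock]

-- a run of indices all landing in row i appends them, in order, to rows[i]
theorem pv_rows_run (K : Int) (i : Nat) (js : List Int) (rows : List (List Int))
    (hi : i < rows.length) (hall : ∀ idx ∈ js, PySem.Int.floordiv idx K = (i : Int)) :
    js.foldl (pvH K) rows = rows.set i (rows[i] ++ js) := by
  induction js generalizing rows with
  | nil => rw [List.foldl_nil, List.append_nil, List.set_getElem_self hi]
  | cons idx js ih =>
    have hfd : PySem.Int.floordiv idx K = (i : Int) := hall idx (List.mem_cons_self)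
    have hstep : pvH K rows idx = rows.set i (rows[i] ++ [idx]) := by
      unfold pvH
      rw [hfd, PySem.List.pyGet?_natCast, List.getElem?_eq_getElem hi]
      simp
    rw [List.foldl_cons, hstep]
    have hi' : i < (rows.set i (rows[i] ++ [idx])).length := by simpa using hi
    rw [ih _ hi' (fun x hx => hall x (List.mem_cons_of_mem _ hx))]
    have hget : (rows.set i (rows[i] ++ [idx]))[i] = rows[i] ++ [idx] := by
      rw [List.getElem_set]; simp
    rw [hget, List.set_set]
    simp

-- characterisation of B's rows fold after t full rows (K > 0)
theorem pv_rows_fold (K : Int) (hK : 0 < K) (N : Nat) (t : Nat) (ht : t ≤ N) :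
    (PySem.List.pyRange 0 ((t : Int) * K)).foldl (pvH K)
        ((List.range N).map (fun _ => ([] : List Int))) =
      (List.range N).map (fun k => if k < t then pvBlock K k else []) := by
  induction t with
  | zero =>
    rw [PySem.List.pyRange_one_eq_nil (by simp)]
    simp
  | succ t ih =>
    have ht' : t ≤ N := Nat.le_of_succ_le ht
    have hsplit : PySem.List.pyRange 0 (((t + 1 : Nat) : Int) * K) =
        PySem.List.pyRange 0 ((t : Int) * K) ++ pvBlock K t := by
      have h1 : (0 : Int) ≤ (t : Int) * K := by positivity
      have h2 : (t : Int) * K ≤ (t : Int) * K + K := by linarith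
      have h3 : ((t + 1 : Nat) : Int) * K = (t : Int) * K + K := by push_cast; ring
      rw [h3]
      exact PySem.List.pyRange_one_append 0 ((t : Int) * K) ((t : Int) * K + K) h1 h2
    rw [hsplit, List.foldl_append, ih ht']
    have htN : t < N := ht
    have hlen : t < ((List.range N).map (fun k => if k < t then pvBlock K k else [])).length := by
      simpa using htN
    rw [pv_rows_run K t (pvBlock K t) _ hlen ?hall]
    case hall =>
      intro idx hidx
      unfold pvBlock at hidx
      rw [PySem.List.mem_pyRange_one] at hidx
      rw [PySem.Int.floordiv_eq_iff_of_pos hK]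
      constructor
      · linarith [hidx.1]
      · nlinarith [hidx.2]
    · apply List.ext_getElem
      · simp
      · intro p hp hp'
        have hpN : p < N := by simpa using hp'
        rw [List.getElem_set]
        by_cases hpt : t = p
        · subst hpt
          simp [pvBlock]
        · rw [if_neg hpt]
          simp only [List.getElem_map, List.getElem_range]
          have : p < t ↔ p < t + 1 := by omega
          simp [this]

-- enumerate over an appended singleton
theorem pv_enumerate_append {α : Type} (l : List α) (x : α) :
    ∀ (s : Int), PySem.List.enumerate (l ++ [x]) s =
      PySem.List.enumerate l s ++ [(s + l.length, x)] := by
  induction l with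
  | nil => intro s; simp [PySem.List.enumerate]
  | cons a t ih =>
    intro s
    simp only [List.cons_append, PySem.List.enumerate, ih (s + 1), List.length_cons]
    have hc : s + 1 + ((t.length : Nat) : Int) = s + ((t.length + 1 : Nat) : Int) := by
      push_cast; ring
    rw [hc]

-- enumerate of a map over List.range, started at 0
theorem pv_enum_map {α : Type} (f : Nat → α) (t : Nat) :
    PySem.List.enumerate ((List.range t).map f) =
      (List.range t).map (fun (k : Nat) => ((k : Int), f k)) := by
  induction t with
  | zero => rfl
  | succ t ih =>
    rw [List.range_succ, List.map_append, List.map_append]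
    simp only [List.map_cons, List.map_nil]
    rw [pv_enumerate_append, ih]
    simp

-- a dict built from enumerate-style pairs with distinct Nat-cast keys lists them verbatim
theorem pv_enum_dict {α : Type} (g : Nat → α) (t : Nat) :
    (((List.range t).map (fun (k : Nat) => ((k : Int), g k))).foldl
        (fun (d : PySem.Dict Int α) p => d.insert p.1 p.2) PySem.Dict.empty).items =
      (List.range t).map (fun (k : Nat) => ((k : Int), g k)) := by
  have := PySem.Dict.items_foldl_insert_fresh
    ((List.range t).map (fun (k : Nat) => ((k : Int), g k)))
    (fun p => p.1) (fun p => p.2) PySem.Dict.empty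
    (by intro a _; exact PySem.Dict.contains_empty a.1)
    (by
      rw [List.map_map]
      have : ((fun (p : Int × α) => p.1) ∘ fun (k : Nat) => ((k : Int), g k)) =
          (Nat.cast : Nat → Int) := by funext k; rfl
      rw [this]
      exact (List.nodup_range).map (fun a b h => by exact_mod_cast h))
  simpa using this

-- ===== VERDICT (by name: the statement is the Claim_ definition above) =====
theorem get_row_mapping_spec : Claim_equal_get_row_mapping := by
  intro n K _
  unfold Spec_get_row_mapping
  rw [pvA_split, pvB_split]
  rw [pv_rows0 n]
  have hlen : (((List.range n.toNat).map (fun _ => ([] : List Int))).length : Int) =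
      ((n.toNat : Nat) : Int) := by simp
  rw [hlen, pv_pyRange0 n, Prod.mk.injEq]
  rcases le_or_gt K 0 with hK | hK
  · -- K ≤ 0: the flat loop is empty and every block is empty
    have hflat : PySem.List.pyRange 0 ((n.toNat : Int) * K) = [] := by
      apply PySem.List.pyRange_one_eq_nil
      exact mul_nonpos_of_nonneg_of_nonpos (by positivity) hK
    have hblock : ∀ k : Nat, pvBlock K k = [] := by
      intro k
      apply PySem.List.pyRange_one_eq_nil
      linarith
    rw [pv_mapM_nonpos K hK, pv_invM K n.toNat, hflat]
    constructor
    · rfl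
    · rw [List.foldl_nil, pv_enum_map (fun _ => ([] : List Int)) n.toNat,
        pv_enum_dict (fun _ => ([] : List Int)) n.toNat]
      apply List.map_congr_left
      intro k _
      rw [hblock k]
  · -- K > 0
    rw [pv_mapM K hK n.toNat, pv_invM K n.toNat]
    constructor
    · -- mapping: A's per-row blocks tile B's flat range
      rw [PySem.Dict.items_foldl_insert_fresh _ (fun idx => idx)
        (fun idx => (PySem.Int.floordiv idx K, PySem.Int.mod idx K)) PySem.Dict.empty
        (by intro a _; exact PySem.Dict.contains_empty a)
        (by simpa using PySem.List.nodup_pyRange_one 0 ((n.toNat : Int) * K))]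
      rw [List.flatMap_map]
      have hrow : ∀ k ∈ List.range n.toNat,
          pvRow K ((k : Nat) : Int) =
            (pvBlock K k).map
              (fun idx => (idx, PySem.Int.floordiv idx K, PySem.Int.mod idx K)) := by
        intro k _
        exact pv_row_eq K (k : Int) hK
      rw [List.flatMap_congr hrow, ← List.map_flatMap, pv_blocks_flatten K hK n.toNat]
      simp
      rfl
    · -- inverse_mapping: B's row buffer holds exactly the blocks
      have hfold := pv_rows_fold K hK n.toNat n.toNat (le_refl _)
      rw [hfold]
      have hmap : (List.range n.toNat).map (fun k => if k < n.toNat then pvBlock K k else []) =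
          (List.range n.toNat).map (pvBlock K) := by
        apply List.map_congr_left
        intro k hk
        rw [List.mem_range] at hk
        simp [hk]
      rw [hmap, pv_enum_map (pvBlock K) n.toNat, pv_enum_dict (pvBlock K) n.toNat]
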